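-- pv_equiv track=rewrite | github.com/NaooyOki/YasouReportReading | utility.py | calcRectEdge
-- ===== SOURCE A (Python) =====
-- def calcRectEdge(contour):
--     """
--     輪郭線のリストから、左上、右上、左下、右下の位置を求める
--     @param contour:list(list(position))
--     @return (左上座標, 右上座標, 左下座標, 右下座標)
--     """
--     # 四隅を求める
--     p1 = contour[0][0]
--     p2 = contour[0][0]
--     p3 = contour[0][0]
--     p4 = contour[0][0]
--     for point in contour:
--         if (p1[0]+p1[1] > point[0][0]+point[0][1]):
--             p1 = point[0]
--         if (p2[0]-p2[1] < point[0][0]-point[0][1]):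
--             p2 = point[0]
--         if (p3[0]-p3[1] > point[0][0]-point[0][1]):
--             p3 = point[0]
--         if (p4[0]+p4[1] < point[0][0]+point[0][1]):
--             p4 = point[0]
--     return (p1, p2, p3, p4)
-- ===== SOURCE B (Python) =====
-- def _combine(a, b):
--     """Merge the corner quadruples of two adjacent contour segments (earlier segment wins ties)."""
--     (a1, a2, a3, a4) = a
--     (b1, b2, b3, b4) = b
--     p1 = b1 if b1[0] + b1[1] < a1[0] + a1[1] else a1
--     p2 = b2 if a2[0] - a2[1] < b2[0] - b2[1] else a2
--     p3 = b3 if b3[0] - b3[1] < a3[0] - a3[1] else a3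
--     p4 = b4 if a4[0] + a4[1] < b4[0] + b4[1] else a4
--     return (p1, p2, p3, p4)
--
--
-- def _corners(lst):
--     """Divide and conquer: corners of a single point, or merge of the two halves' corners."""
--     if len(lst) <= 1:
--         p = lst[0]
--         return (p, p, p, p)
--     mid = len(lst) // 2
--     return _combine(_corners(lst[:mid]), _corners(lst[mid:]))
--
--
-- def calcRectEdge(contour):
--     """
--     輪郭線のリストから、左上、右上、左下、右下の位置を求める
--     @param contour:list(list(position))
--     @return (左上座標, 右上座標, 左下座標, 右下座標)
--     """
--     return _corners([point[0] for point in contour])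
-- ===== Notes on version B (the rewrite author's own statement) =====
-- stated objective: alternative
-- what changed: Replaces A's single left-to-right loop carrying four running corners by a divide-and-conquer recursion: the point list is split in halves, each half's corner quadruple is computed recursively, and the quadruples are merged with a left-biased combine (so the earlier extremal point wins ties, matching A).
import Mathlib
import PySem

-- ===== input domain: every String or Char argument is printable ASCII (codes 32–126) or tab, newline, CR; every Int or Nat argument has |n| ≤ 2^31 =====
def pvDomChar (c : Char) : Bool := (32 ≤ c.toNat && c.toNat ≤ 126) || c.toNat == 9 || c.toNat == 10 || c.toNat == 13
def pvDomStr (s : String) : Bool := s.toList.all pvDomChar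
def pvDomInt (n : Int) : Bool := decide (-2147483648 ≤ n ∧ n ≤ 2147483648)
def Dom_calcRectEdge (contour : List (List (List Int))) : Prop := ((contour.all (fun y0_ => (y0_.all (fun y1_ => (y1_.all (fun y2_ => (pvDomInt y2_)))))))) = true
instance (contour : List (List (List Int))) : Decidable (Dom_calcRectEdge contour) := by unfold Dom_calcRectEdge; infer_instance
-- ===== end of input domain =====

-- B computes the four corners by divide-and-conquer over the point list instead of A's single running loop (return value only; same O(n) cost).


-- ===== PORT A =====
-- xs[i] for 0 ≤ i (total form; Pre_ keeps every access in range)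
def pvIdx (p : List Int) (i : Int) : Int := (PySem.List.pyGet? p i).getD 0
-- point[0] (total form; Pre_ keeps the list nonempty)
def pvRow (point : List (List Int)) : List Int := (PySem.List.pyGet? point 0).getD []

-- one iteration of A's for-loop, updating the four running corners
def calcRectEdgeStep (s : List Int × List Int × List Int × List Int) (point : List (List Int)) :
    List Int × List Int × List Int × List Int :=
  let (p1, p2, p3, p4) := s
  let p1 := if pvIdx p1 0 + pvIdx p1 1 > pvIdx (pvRow point) 0 + pvIdx (pvRow point) 1 then pvRow point else p1
  let p2 := if pvIdx p2 0 - pvIdx p2 1 < pvIdx (pvRow point) 0 - pvIdx (pvRow point) 1 then pvRow point else p2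
  let p3 := if pvIdx p3 0 - pvIdx p3 1 > pvIdx (pvRow point) 0 - pvIdx (pvRow point) 1 then pvRow point else p3
  let p4 := if pvIdx p4 0 + pvIdx p4 1 < pvIdx (pvRow point) 0 + pvIdx (pvRow point) 1 then pvRow point else p4
  (p1, p2, p3, p4)

def calcRectEdge (contour : List (List (List Int))) : List Int × List Int × List Int × List Int :=
  let p0 := pvRow ((PySem.List.pyGet? contour 0).getD [])
  contour.foldl calcRectEdgeStep (p0, p0, p0, p0)

-- ===== PORT B =====
-- _combine from Source B: merge the corner quadruples of two adjacent segments (left segment wins ties)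
def pvCombine (a b : List Int × List Int × List Int × List Int) :
    List Int × List Int × List Int × List Int :=
  (if pvIdx b.1 0 + pvIdx b.1 1 < pvIdx a.1 0 + pvIdx a.1 1 then b.1 else a.1,
   if pvIdx a.2.1 0 - pvIdx a.2.1 1 < pvIdx b.2.1 0 - pvIdx b.2.1 1 then b.2.1 else a.2.1,
   if pvIdx b.2.2.1 0 - pvIdx b.2.2.1 1 < pvIdx a.2.2.1 0 - pvIdx a.2.2.1 1 then b.2.2.1 else a.2.2.1,
   if pvIdx a.2.2.2 0 + pvIdx a.2.2.2 1 < pvIdx b.2.2.2 0 + pvIdx b.2.2.2 1 then b.2.2.2 else a.2.2.2)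

-- _corners from Source B (lst[:mid]/lst[mid:] with 0 ≤ mid ≤ len are exactly take/drop)
def pvCorners (lst : List (List Int)) : List Int × List Int × List Int × List Int :=
  if h : lst.length ≤ 1 then
    ((PySem.List.pyGet? lst 0).getD [], (PySem.List.pyGet? lst 0).getD [],
     (PySem.List.pyGet? lst 0).getD [], (PySem.List.pyGet? lst 0).getD [])
  else
    pvCombine (pvCorners (lst.take (lst.length / 2))) (pvCorners (lst.drop (lst.length / 2)))
termination_by lst.length
decreasing_by
  · simp only [List.length_take]; omega
  · simp only [List.length_drop]; omega

def calcRectEdge_alt (contour : List (List (List Int))) : List Int × List Int × List Int × List Int :=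
  pvCorners (contour.map pvRow)

-- ===== PRECONDITION & SPEC =====
-- Pre_ excludes exactly the inputs where A raises (IndexError): an empty contour, an
-- element with no points, or a first point with fewer than two coordinates.
def Pre_calcRectEdge (contour : List (List (List Int))) : Prop :=
  contour ≠ [] ∧ ∀ point ∈ contour, point ≠ [] ∧ 2 ≤ (point.headD []).length
instance (contour : List (List (List Int))) : Decidable (Pre_calcRectEdge contour) := by
  unfold Pre_calcRectEdge; infer_instance

def pvWitness_calcRectEdge : List (List (List Int)) := [[[0, 1]], [[3, -2], [9, 9]]]

def Spec_calcRectEdge (contour : List (List (List Int))) (out : List Int × List Int × List Int × List Int) : Prop := out = calcRectEdge_alt contour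
instance (contour : List (List (List Int))) (out : List Int × List Int × List Int × List Int) : Decidable (Spec_calcRectEdge contour out) := by unfold Spec_calcRectEdge; infer_instance

-- ===== CLAIM (what is proved, stated in full; the proofs are below) =====
def Claim_equal_calcRectEdge : Prop := ∀ (contour : List (List (List Int))), Dom_calcRectEdge contour → Pre_calcRectEdge contour → Spec_calcRectEdge contour (calcRectEdge contour)

-- ===== LEMMAS AND PROOFS =====

-- the two binary merge operations, each left-biased on ties
def cmin (k : List Int → Int) (a b : List Int) : List Int := if k b < k a then b else a
def cmax (k : List Int → Int) (a b : List Int) : List Int := if k a < k b then b else a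

def kS (p : List Int) : Int := pvIdx p 0 + pvIdx p 1
def kD (p : List Int) : Int := pvIdx p 0 - pvIdx p 1

-- first extremal element of a nonempty list, as a fold
def Fmin (k : List Int → Int) (l : List (List Int)) : List Int := l.tail.foldl (cmin k) (l.headD [])
def Fmax (k : List Int → Int) (l : List (List Int)) : List Int := l.tail.foldl (cmax k) (l.headD [])

lemma cmin_self (k : List Int → Int) (a : List Int) : cmin k a a = a := by
  simp [cmin]

lemma cmax_self (k : List Int → Int) (a : List Int) : cmax k a a = a := by
  simp [cmax]

lemma foldl_cmin_shift (k : List Int → Int) (t : List (List Int)) :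
    ∀ x y, t.foldl (cmin k) (cmin k x y) = cmin k x (t.foldl (cmin k) y) := by
  induction t with
  | nil => intro x y; rfl
  | cons z t ih =>
      intro x y
      simp only [List.foldl_cons]
      rw [show cmin k (cmin k x y) z = cmin k x (cmin k y z) by
        unfold cmin; split_ifs <;> first | rfl | omega]
      exact ih x (cmin k y z)

lemma foldl_cmax_shift (k : List Int → Int) (t : List (List Int)) :
    ∀ x y, t.foldl (cmax k) (cmax k x y) = cmax k x (t.foldl (cmax k) y) := by
  induction t with
  | nil => intro x y; rfl
  | cons z t ih =>
      intro x y
      simp only [List.foldl_cons]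
      rw [show cmax k (cmax k x y) z = cmax k x (cmax k y z) by
        unfold cmax; split_ifs <;> first | rfl | omega]
      exact ih x (cmax k y z)

lemma Fmin_append (k : List Int → Int) (l1 l2 : List (List Int)) (h1 : l1 ≠ []) (h2 : l2 ≠ []) :
    Fmin k (l1 ++ l2) = cmin k (Fmin k l1) (Fmin k l2) := by
  obtain ⟨p, t1, rfl⟩ := List.exists_cons_of_ne_nil h1
  obtain ⟨q, t2, rfl⟩ := List.exists_cons_of_ne_nil h2
  simp only [Fmin, List.cons_append, List.tail_cons, List.headD_cons, List.foldl_append,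
    List.foldl_cons]
  exact foldl_cmin_shift k t2 (t1.foldl (cmin k) p) q

lemma Fmax_append (k : List Int → Int) (l1 l2 : List (List Int)) (h1 : l1 ≠ []) (h2 : l2 ≠ []) :
    Fmax k (l1 ++ l2) = cmax k (Fmax k l1) (Fmax k l2) := by
  obtain ⟨p, t1, rfl⟩ := List.exists_cons_of_ne_nil h1
  obtain ⟨q, t2, rfl⟩ := List.exists_cons_of_ne_nil h2
  simp only [Fmax, List.cons_append, List.tail_cons, List.headD_cons, List.foldl_append,
    List.foldl_cons]
  exact foldl_cmax_shift k t2 (t1.foldl (cmax k) p) q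

-- B's recursion computes exactly the four first-extremal points
lemma pvCorners_eq : ∀ (n : ℕ) (l : List (List Int)), l.length ≤ n → l ≠ [] →
    pvCorners l = (Fmin kS l, Fmax kD l, Fmin kD l, Fmax kS l) := by
  intro n
  induction n with
  | zero =>
      intro l hl hne
      cases l with
      | nil => exact absurd rfl hne
      | cons a t => simp at hl
  | succ n ih =>
      intro l hl hne
      rw [pvCorners]
      by_cases h1 : l.length ≤ 1
      · rw [dif_pos h1]
        match l, hne, h1 with
        | [p], _, _ =>
            simp [Fmin, Fmax, PySem.List.pyGet?, PySem.List.pyIdx?]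
      · rw [dif_neg h1]
        have hlen : 2 ≤ l.length := by omega
        have hmid1 : 1 ≤ l.length / 2 := by omega
        have hmid2 : l.length / 2 < l.length := by omega
        have htne : l.take (l.length / 2) ≠ [] := by
          intro h
          have := congrArg List.length h
          simp only [List.length_take, List.length_nil] at this
          omega
        have hdne : l.drop (l.length / 2) ≠ [] := by
          intro h
          have := congrArg List.length h
          simp only [List.length_drop, List.length_nil] at this
          omega
        rw [ih (l.take (l.length / 2)) (by simp only [List.length_take]; omega) htne,
            ih (l.drop (l.length / 2)) (by simp only [List.length_drop]; omega) hdne]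
        have hsplit : l.take (l.length / 2) ++ l.drop (l.length / 2) = l := List.take_append_drop _ _
        conv_rhs => rw [← hsplit]
        rw [Fmin_append _ _ _ htne hdne, Fmax_append _ _ _ htne hdne,
            Fmin_append _ _ _ htne hdne, Fmax_append _ _ _ htne hdne]
        rfl

-- A's quad fold splits into four independent folds over the rows
lemma foldl_step_split (l : List (List (List Int))) (a b c d : List Int) :
    l.foldl calcRectEdgeStep (a, b, c, d) =
      ((l.map pvRow).foldl (cmin kS) a, (l.map pvRow).foldl (cmax kD) b,
       (l.map pvRow).foldl (cmin kD) c, (l.map pvRow).foldl (cmax kS) d) := by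
  induction l generalizing a b c d with
  | nil => rfl
  | cons x t ih =>
      simp only [List.foldl_cons, List.map_cons]
      rw [show calcRectEdgeStep (a, b, c, d) x =
        (cmin kS a (pvRow x), cmax kD b (pvRow x), cmin kD c (pvRow x), cmax kS d (pvRow x))
        from rfl, ih]

-- ===== VERDICT (by name: the statement is the Claim_ definition above) =====
theorem calcRectEdge_spec : Claim_equal_calcRectEdge := by
  intro contour _ hpre
  unfold Spec_calcRectEdge
  obtain ⟨hne, -⟩ := hpre
  obtain ⟨c, t, rfl⟩ := List.exists_cons_of_ne_nil hne
  have h0 : (PySem.List.pyGet? (c :: t) 0).getD [] = c := by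
    simp [PySem.List.pyGet?, PySem.List.pyIdx?]
  show (c :: t).foldl calcRectEdgeStep
      (pvRow ((PySem.List.pyGet? (c :: t) 0).getD []),
       pvRow ((PySem.List.pyGet? (c :: t) 0).getD []),
       pvRow ((PySem.List.pyGet? (c :: t) 0).getD []),
       pvRow ((PySem.List.pyGet? (c :: t) 0).getD [])) = _
  rw [h0]
  have hfirst : calcRectEdgeStep (pvRow c, pvRow c, pvRow c, pvRow c) c
      = (pvRow c, pvRow c, pvRow c, pvRow c) := by
    show (cmin kS (pvRow c) (pvRow c), cmax kD (pvRow c) (pvRow c),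
          cmin kD (pvRow c) (pvRow c), cmax kS (pvRow c) (pvRow c)) = _
    rw [cmin_self, cmax_self, cmin_self, cmax_self]
  rw [List.foldl_cons, hfirst, foldl_step_split]
  show _ = pvCorners ((c :: t).map pvRow)
  rw [pvCorners_eq ((c :: t).map pvRow).length _ le_rfl (by simp)]
  simp only [List.map_cons, Fmin, Fmax, List.tail_cons, List.headD_cons]
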